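-- pv_equiv track=rewrite | github.com/encgoo/hackerrank | Search/meet_in_the_middle.py | find_zero_sum
-- ===== SOURCE A (Python) =====
-- def find_zero_sum(l1, l2, l3, l4):
--     """
--     Brute force approach. Use 4 for-loops to find all the possibilities
--     :return:
--     """
--     count = 0
--     for i in range(len(l1)):
--         for j in range(len(l2)):
--             for k in range(len(l3)):
--                 for l in range(len(l4)):
--                     if l1[i] + l2[j] + l3[k] + l4[l] == 0:
--                         count += 1
--     return count
-- ===== SOURCE B (Python) =====
-- def find_zero_sum(l1, l2, l3, l4):
--     """
--     Meet in the middle: count every pair sum of l1 x l2 in a dict,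
--     then add the multiplicity of -(c + d) for every pair of l3 x l4.
--     """
--     sums = {}
--     for a in l1:
--         for b in l2:
--             s = a + b
--             sums[s] = sums.get(s, 0) + 1
--     total = 0
--     for c in l3:
--         for d in l4:
--             total += sums.get(-(c + d), 0)
--     return total
-- ===== Notes on version B (the rewrite author's own statement) =====
-- stated objective: faster
-- what changed: Replaced the four nested index loops by meet-in-the-middle: a dict counting all l1+l2 pair sums, then one pass over l3 x l4 pairs looking up the count of the negated sum.
import Mathlib
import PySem

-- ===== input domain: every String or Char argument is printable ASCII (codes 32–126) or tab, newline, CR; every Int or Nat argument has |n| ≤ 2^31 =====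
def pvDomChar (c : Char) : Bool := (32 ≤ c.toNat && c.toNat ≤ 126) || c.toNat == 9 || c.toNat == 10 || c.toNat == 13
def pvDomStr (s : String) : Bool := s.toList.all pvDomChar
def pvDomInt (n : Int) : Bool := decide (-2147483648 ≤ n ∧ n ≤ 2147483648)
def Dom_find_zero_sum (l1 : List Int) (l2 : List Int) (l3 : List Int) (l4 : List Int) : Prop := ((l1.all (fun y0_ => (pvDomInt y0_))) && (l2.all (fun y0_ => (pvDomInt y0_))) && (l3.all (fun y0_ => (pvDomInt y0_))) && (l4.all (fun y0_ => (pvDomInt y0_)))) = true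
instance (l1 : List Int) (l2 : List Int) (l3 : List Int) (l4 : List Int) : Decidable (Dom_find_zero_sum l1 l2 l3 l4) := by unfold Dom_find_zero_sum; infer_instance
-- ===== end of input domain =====

-- B replaces A's four nested loops by meet-in-the-middle (a counter of l1+l2 pair
-- sums, then lookups of -(l3+l4) pair sums): same count, O(n^2) instead of O(n^4).

-- ===== PORT A =====
def find_zero_sum (l1 : List Int) (l2 : List Int) (l3 : List Int) (l4 : List Int) : Int :=
  (PySem.List.pyRange 0 (PySem.List.len l1) 1).foldl (fun count i =>
    (PySem.List.pyRange 0 (PySem.List.len l2) 1).foldl (fun count j =>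
      (PySem.List.pyRange 0 (PySem.List.len l3) 1).foldl (fun count k =>
        (PySem.List.pyRange 0 (PySem.List.len l4) 1).foldl (fun count l =>
          if PySem.List.pyGetD l1 i 0 + PySem.List.pyGetD l2 j 0 +
             PySem.List.pyGetD l3 k 0 + PySem.List.pyGetD l4 l 0 = 0
          then count + 1 else count) count) count) count) 0

-- ===== PORT B =====
def find_zero_sum_alt (l1 : List Int) (l2 : List Int) (l3 : List Int) (l4 : List Int) : Int :=
  let sums : PySem.Dict Int Int :=
    l1.foldl (fun d a =>
      l2.foldl (fun d b =>
        let s := a + b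
        d.insert s (d.getD s 0 + 1)) d) PySem.Dict.empty
  l3.foldl (fun total c =>
    l4.foldl (fun total d =>
      total + sums.getD (-(c + d)) 0) total) 0

-- ===== PRECONDITION & SPEC =====
def Spec_find_zero_sum (l1 : List Int) (l2 : List Int) (l3 : List Int) (l4 : List Int) (out : Int) : Prop := out = find_zero_sum_alt l1 l2 l3 l4
instance (l1 : List Int) (l2 : List Int) (l3 : List Int) (l4 : List Int) (out : Int) : Decidable (Spec_find_zero_sum l1 l2 l3 l4 out) := by unfold Spec_find_zero_sum; infer_instance

-- ===== CLAIM (what is proved, stated in full; the proofs are below) =====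
def Claim_equal_find_zero_sum : Prop := ∀ (l1 : List Int) (l2 : List Int) (l3 : List Int) (l4 : List Int), Dom_find_zero_sum l1 l2 l3 l4 → Spec_find_zero_sum l1 l2 l3 l4 (find_zero_sum l1 l2 l3 l4)

-- ===== LEMMAS AND PROOFS =====

-- All l1+l2 pair sums (the multiset behind B's counter dict).
def pairSums (xs ys : List Int) : List Int := xs.flatMap (fun a => ys.map (fun b => a + b))

-- Sum of a function over pairSums, as a double sum.
theorem sum_map_pairSums (xs ys : List Int) (g : Int → Int) :
    ((pairSums xs ys).map g).sum
      = (xs.map (fun a => (ys.map (fun b => g (a + b))).sum)).sum := by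
  induction xs with
  | nil => simp [pairSums]
  | cons a xs ih =>
    simp [pairSums, List.flatMap_cons, List.map_append, Function.comp_def] at ih ⊢
    simp [ih]

-- Exchanging the order of a double list sum.
theorem sum_swap {α β : Type} (xs : List α) (ys : List β) (f : α → β → Int) :
    (xs.map (fun x => (ys.map (fun y => f x y)).sum)).sum
      = (ys.map (fun y => (xs.map (fun x => f x y)).sum)).sum := by
  induction xs with
  | nil => simp
  | cons a xs ih => simp [ih]

-- A Python index loop 'for j in range(len(xs))' whose body adds S(xs[j]) is a sum.
theorem foldl_range_step (xs : List Int) (F : Int → Int → Int) (S : Int → Int)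
    (hF : ∀ init x, F init x = init + S x) (init : Int) :
    List.foldl (fun acc j => F acc (PySem.List.pyGetD xs j 0)) init
        (PySem.List.pyRange 0 (PySem.List.len xs))
      = init + (xs.map S).sum := by
  rw [PySem.List.foldl_pyRange_zero_pyGetD xs 0 F init]
  have hFe : F = fun acc x => acc + S x := funext fun a => funext fun x => hF a x
  rw [hFe, PySem.List.foldl_add]

theorem find_zero_sum_eq_alt (l1 l2 l3 l4 : List Int) :
    find_zero_sum l1 l2 l3 l4 = find_zero_sum_alt l1 l2 l3 l4 := by
  -- A as a quadruple sum of 0/1 indicators over the elements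
  have h4 : ∀ a b c (init : Int),
      List.foldl (fun count l =>
          if a + b + c + PySem.List.pyGetD l4 l 0 = 0 then count + 1 else count) init
          (PySem.List.pyRange 0 (PySem.List.len l4))
        = init + (l4.map (fun d => if a + b + c + d = 0 then (1 : Int) else 0)).sum := by
    intro a b c init
    exact foldl_range_step l4 (fun count d => if a + b + c + d = 0 then count + 1 else count)
      (fun d => if a + b + c + d = 0 then (1 : Int) else 0)
      (fun i x => by by_cases h : a + b + c + x = 0 <;> simp [h]) init
  have h3 : ∀ a b (init : Int),
      List.foldl (fun count k =>
          List.foldl (fun count l =>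
              if a + b + PySem.List.pyGetD l3 k 0 + PySem.List.pyGetD l4 l 0 = 0
              then count + 1 else count) count
            (PySem.List.pyRange 0 (PySem.List.len l4))) init
          (PySem.List.pyRange 0 (PySem.List.len l3))
        = init + (l3.map (fun c =>
            (l4.map (fun d => if a + b + c + d = 0 then (1 : Int) else 0)).sum)).sum := by
    intro a b init
    exact foldl_range_step l3 (fun count c =>
        List.foldl (fun count l =>
            if a + b + c + PySem.List.pyGetD l4 l 0 = 0 then count + 1 else count) count
          (PySem.List.pyRange 0 (PySem.List.len l4)))
      (fun c => (l4.map (fun d => if a + b + c + d = 0 then (1 : Int) else 0)).sum)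
      (fun i c => h4 a b c i) init
  have h2 : ∀ a (init : Int),
      List.foldl (fun count j =>
          List.foldl (fun count k =>
              List.foldl (fun count l =>
                  if a + PySem.List.pyGetD l2 j 0 + PySem.List.pyGetD l3 k 0 +
                     PySem.List.pyGetD l4 l 0 = 0 then count + 1 else count) count
                (PySem.List.pyRange 0 (PySem.List.len l4))) count
            (PySem.List.pyRange 0 (PySem.List.len l3))) init
          (PySem.List.pyRange 0 (PySem.List.len l2))
        = init + (l2.map (fun b => (l3.map (fun c =>
            (l4.map (fun d => if a + b + c + d = 0 then (1 : Int) else 0)).sum)).sum)).sum := by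
    intro a init
    exact foldl_range_step l2 (fun count b =>
        List.foldl (fun count k =>
            List.foldl (fun count l =>
                if a + b + PySem.List.pyGetD l3 k 0 + PySem.List.pyGetD l4 l 0 = 0
                then count + 1 else count) count
              (PySem.List.pyRange 0 (PySem.List.len l4))) count
          (PySem.List.pyRange 0 (PySem.List.len l3)))
      (fun b => (l3.map (fun c =>
          (l4.map (fun d => if a + b + c + d = 0 then (1 : Int) else 0)).sum)).sum)
      (fun i b => h3 a b i) init
  have hA : find_zero_sum l1 l2 l3 l4
      = (l1.map (fun a => (l2.map (fun b => (l3.map (fun c =>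
          (l4.map (fun d => if a + b + c + d = 0 then (1 : Int) else 0)).sum)).sum)).sum)).sum := by
    unfold find_zero_sum
    have := foldl_range_step l1 (fun count a =>
        List.foldl (fun count j =>
            List.foldl (fun count k =>
                List.foldl (fun count l =>
                    if a + PySem.List.pyGetD l2 j 0 + PySem.List.pyGetD l3 k 0 +
                       PySem.List.pyGetD l4 l 0 = 0 then count + 1 else count) count
                  (PySem.List.pyRange 0 (PySem.List.len l4))) count
              (PySem.List.pyRange 0 (PySem.List.len l3))) count
          (PySem.List.pyRange 0 (PySem.List.len l2)))
      (fun a => (l2.map (fun b => (l3.map (fun c =>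
          (l4.map (fun d => if a + b + c + d = 0 then (1 : Int) else 0)).sum)).sum)).sum)
      (fun i a => h2 a i) 0
    simpa using this
  -- B as a double sum of pair-sum counts
  have hB : find_zero_sum_alt l1 l2 l3 l4
      = (l3.map (fun c => (l4.map (fun d =>
          ((pairSums l1 l2).count (-(c + d)) : Int))).sum)).sum := by
    unfold find_zero_sum_alt
    have hdict : ∀ v : Int,
        (l1.foldl (fun d a => l2.foldl (fun d b =>
            d.insert (a + b) (d.getD (a + b) 0 + 1)) d)
          (PySem.Dict.empty : PySem.Dict Int Int)).getD v 0
          = ((pairSums l1 l2).count v : Int) := by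
      intro v
      have h2' : ∀ (d : PySem.Dict Int Int) (a : Int),
          l2.foldl (fun d b => d.insert (a + b) (d.getD (a + b) 0 + 1)) d
            = (l2.map (fun b => a + b)).foldl (fun d s => d.insert s (d.getD s 0 + 1)) d := by
        intro d a; rw [List.foldl_map]
      have hflat : l1.foldl (fun d a => l2.foldl (fun d b =>
              d.insert (a + b) (d.getD (a + b) 0 + 1)) d)
            (PySem.Dict.empty : PySem.Dict Int Int)
          = (pairSums l1 l2).foldl (fun d s => d.insert s (d.getD s 0 + 1))
            (PySem.Dict.empty : PySem.Dict Int Int) := by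
        rw [pairSums, List.foldl_flatMap]
        exact PySem.List.foldl_congr_mem l1 _ _ _ (fun d a _ => h2' d a)
      rw [hflat, PySem.Dict.getD_foldl_insert_add_one]; simp
    simp only [hdict, PySem.List.foldl_add]
    simp
  rw [hA, hB]
  -- indicator of a zero quadruple = indicator that the l1+l2 pair sum hits -(c+d)
  have hcount : ∀ c d : Int, ((pairSums l1 l2).count (-(c + d)) : Int)
      = (l1.map (fun a => (l2.map (fun b =>
          if a + b + c + d = 0 then (1 : Int) else 0)).sum)).sum := by
    intro c d
    rw [List.count_eq_countP, ← PySem.List.sum_map_ite_one_zero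
      (fun s => s == -(c + d)) (pairSums l1 l2), sum_map_pairSums]
    refine congrArg List.sum (List.map_congr_left fun a _ => ?_)
    refine congrArg List.sum (List.map_congr_left fun b _ => ?_)
    by_cases h : a + b + c + d = 0
    · rw [if_pos h, if_pos (by simp; omega)]
    · rw [if_neg h, if_neg (by simp; omega)]
  -- swap the (a,b) block with the (c,d) block, one adjacent exchange at a time
  calc (l1.map (fun a => (l2.map (fun b => (l3.map (fun c =>
          (l4.map (fun d => if a + b + c + d = 0 then (1 : Int) else 0)).sum)).sum)).sum)).sum
      = (l1.map (fun a => (l3.map (fun c => (l2.map (fun b =>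
          (l4.map (fun d => if a + b + c + d = 0 then (1 : Int) else 0)).sum)).sum)).sum)).sum := by
        refine congrArg List.sum (List.map_congr_left fun a _ => ?_)
        exact sum_swap l2 l3 (fun b c =>
          (l4.map (fun d => if a + b + c + d = 0 then (1 : Int) else 0)).sum)
    _ = (l3.map (fun c => (l1.map (fun a => (l2.map (fun b =>
          (l4.map (fun d => if a + b + c + d = 0 then (1 : Int) else 0)).sum)).sum)).sum)).sum := by
        exact sum_swap l1 l3 (fun a c => (l2.map (fun b =>
          (l4.map (fun d => if a + b + c + d = 0 then (1 : Int) else 0)).sum)).sum)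
    _ = (l3.map (fun c => (l1.map (fun a => (l4.map (fun d => (l2.map (fun b =>
          if a + b + c + d = 0 then (1 : Int) else 0)).sum)).sum)).sum)).sum := by
        refine congrArg List.sum (List.map_congr_left fun c _ => ?_)
        refine congrArg List.sum (List.map_congr_left fun a _ => ?_)
        exact sum_swap l2 l4 (fun b d => if a + b + c + d = 0 then (1 : Int) else 0)
    _ = (l3.map (fun c => (l4.map (fun d => (l1.map (fun a => (l2.map (fun b =>
          if a + b + c + d = 0 then (1 : Int) else 0)).sum)).sum)).sum)).sum := by
        refine congrArg List.sum (List.map_congr_left fun c _ => ?_)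
        exact sum_swap l1 l4 (fun a d => (l2.map (fun b =>
          if a + b + c + d = 0 then (1 : Int) else 0)).sum)
    _ = (l3.map (fun c => (l4.map (fun d =>
          ((pairSums l1 l2).count (-(c + d)) : Int))).sum)).sum := by
        refine congrArg List.sum (List.map_congr_left fun c _ => ?_)
        refine congrArg List.sum (List.map_congr_left fun d _ => ?_)
        exact (hcount c d).symm

-- ===== VERDICT (by name: the statement is the Claim_ definition above) =====
theorem find_zero_sum_spec : Claim_equal_find_zero_sum := by
  intro l1 l2 l3 l4 _
  exact find_zero_sum_eq_alt l1 l2 l3 l4
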